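-- pv_equiv track=rewrite | github.com/seanahrens/unarxiv | unarxiv-web/modal_worker/regex_scripter/latex_parser.py | _strip_twocolumn
-- ===== SOURCE A (Python) =====
-- def _skip_bracketed_group(text: str, pos: int) -> int:
--     """Advance past an optional [...] group starting at pos."""
--     if pos >= len(text) or text[pos] != "[":
--         return pos
--     depth = 1
--     i = pos + 1
--     while i < len(text) and depth:
--         if text[i] == "[":
--             depth += 1
--         elif text[i] == "]":
--             depth -= 1
--         i += 1
--     return i
--
-- def _strip_twocolumn(text: str) -> str:
--     """Strip \\twocolumn[...] optional args but keep body text."""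
--     result = []
--     i = 0
--     while i < len(text):
--         needle = "\\twocolumn"
--         if text[i:i + len(needle)] == needle:
--             i += len(needle)
--             while i < len(text) and text[i] in " \t\n":
--                 i += 1
--             i = _skip_bracketed_group(text, i)
--         else:
--             result.append(text[i])
--             i += 1
--     return "".join(result)
-- ===== SOURCE B (Python) =====
-- def _skip_bracketed_group(text: str, pos: int) -> int:
--     """Advance past an optional [...] group starting at pos."""
--     if pos >= len(text) or text[pos] != "[":
--         return pos
--     depth = 1
--     i = pos + 1
--     while i < len(text) and depth:
--         if text[i] == "[":
--             depth += 1
--         elif text[i] == "]":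
--             depth -= 1
--         i += 1
--     return i
--
-- def _strip_twocolumn(text: str) -> str:
--     """Strip \\twocolumn[...] optional args but keep body text."""
--     needle = "\\twocolumn"
--     parts = []
--     i = 0
--     while True:
--         j = text.find(needle, i)
--         if j == -1:
--             parts.append(text[i:])
--             break
--         parts.append(text[i:j])
--         i = j + len(needle)
--         while i < len(text) and text[i] in " \t\n":
--             i += 1
--         i = _skip_bracketed_group(text, i)
--     return "".join(parts)
-- ===== Notes on version B (the rewrite author's own statement) =====
-- stated objective: faster
-- what changed: Replaced the char-by-char loop that copies one character per iteration with a find-based scan that appends whole slices between \twocolumn occurrences and joins them at the end.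
import Mathlib
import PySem

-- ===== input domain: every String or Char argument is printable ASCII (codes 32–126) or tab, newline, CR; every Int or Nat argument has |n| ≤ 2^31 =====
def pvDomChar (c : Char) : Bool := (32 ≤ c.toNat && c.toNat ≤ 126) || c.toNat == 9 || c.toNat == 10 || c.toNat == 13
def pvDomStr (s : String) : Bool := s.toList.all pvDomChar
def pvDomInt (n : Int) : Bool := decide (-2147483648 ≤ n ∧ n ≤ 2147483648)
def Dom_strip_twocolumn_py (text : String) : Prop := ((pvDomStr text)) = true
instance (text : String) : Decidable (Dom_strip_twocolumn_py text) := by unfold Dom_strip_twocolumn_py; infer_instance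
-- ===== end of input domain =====

-- B replaces A's char-by-char copy loop with a find-based scan appending whole
-- slices between \twocolumn occurrences (measurably faster by a constant factor).

-- ===== PORT A =====
-- shared module helper _skip_bracketed_group (both Pythons call it verbatim);
-- the position argument is represented by the remaining suffix of the text.
def pvNeedle : List Char := ['\\', 't', 'w', 'o', 'c', 'o', 'l', 'u', 'm', 'n']

def pvIsWs (c : Char) : Bool := c = ' ' || c = '\t' || c = '\n'

def pvGroupLoop : List Char → Nat → List Char
  | cs, 0 => cs
  | [], _ + 1 => []
  | c :: rest, d + 1 =>
      pvGroupLoop rest (if c = '[' then d + 2 else if c = ']' then d else d + 1)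

def pvSkipGroup : List Char → List Char
  | [] => []
  | c :: rest => if c = '[' then pvGroupLoop rest 1 else c :: rest

theorem pvGroupLoop_length_le : ∀ (cs : List Char) (d : Nat), (pvGroupLoop cs d).length ≤ cs.length
  | _, 0 => by simp [pvGroupLoop]
  | [], _ + 1 => by simp [pvGroupLoop]
  | c :: rest, d + 1 => by
      simp only [pvGroupLoop, List.length_cons]
      exact le_trans (pvGroupLoop_length_le rest _) (Nat.le_succ _)

theorem pvSkipGroup_length_le (cs : List Char) : (pvSkipGroup cs).length ≤ cs.length := by
  match cs with
  | [] => simp [pvSkipGroup]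
  | c :: rest =>
      simp only [pvSkipGroup]
      split
      · exact le_trans (pvGroupLoop_length_le rest 1) (Nat.le_succ _)
      · exact le_refl _

-- A's main loop: scan char by char, copy non-matching chars, on a \twocolumn
-- match skip the needle, any ' \t\n' whitespace, and one bracketed group.
def pvStripA : List Char → List Char
  | [] => []
  | c :: rest =>
      if pvNeedle.isPrefixOf (c :: rest) then
        pvStripA (pvSkipGroup (((c :: rest).drop 10).dropWhile pvIsWs))
      else
        c :: pvStripA rest
termination_by cs => cs.length
decreasing_by
  · rename_i h
    have hlen : pvNeedle.length ≤ (c :: rest).length :=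
      (List.isPrefixOf_iff_prefix.mp h).length_le
    simp only [pvNeedle, List.length] at hlen
    calc (pvSkipGroup (((c :: rest).drop 10).dropWhile pvIsWs)).length
        ≤ (((c :: rest).drop 10).dropWhile pvIsWs).length := pvSkipGroup_length_le _
      _ ≤ ((c :: rest).drop 10).length := List.length_dropWhile_le _ _
      _ = (c :: rest).length - 10 := List.length_drop
      _ < (c :: rest).length := by simp only [List.length_cons]; omega
  · simp

def strip_twocolumn_py (text : String) : String := String.ofList (pvStripA text.toList)

-- ===== PORT B =====
-- B-side: text.find(needle, i) — split the remaining text at the first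
-- \twocolumn occurrence, returning (slice before it, suffix after it).
def pvSplitAtNeedle : List Char → Option (List Char × List Char)
  | [] => none
  | c :: rest =>
      if pvNeedle.isPrefixOf (c :: rest) then
        some ([], (c :: rest).drop 10)
      else
        match pvSplitAtNeedle rest with
        | none => none
        | some (p, q) => some (c :: p, q)

theorem pvSplitAtNeedle_length : ∀ (cs p q : List Char),
    pvSplitAtNeedle cs = some (p, q) → p.length + 10 + q.length = cs.length := by
  intro cs
  induction cs with
  | nil => intro p q h; simp [pvSplitAtNeedle] at h
  | cons c rest ih =>
      intro p q h
      by_cases hp : pvNeedle.isPrefixOf (c :: rest)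
      · simp only [pvSplitAtNeedle, if_pos hp] at h
        have hlen : pvNeedle.length ≤ (c :: rest).length :=
          (List.isPrefixOf_iff_prefix.mp hp).length_le
        simp only [pvNeedle, List.length] at hlen
        obtain ⟨hp1, hq1⟩ := Option.some.inj h |> Prod.mk.inj
        subst hp1
        subst hq1
        simp only [List.length_nil, List.length_drop, List.length_cons]
        omega
      · simp only [pvSplitAtNeedle, if_neg hp] at h
        cases hq : pvSplitAtNeedle rest with
        | none => rw [hq] at h; cases h
        | some pq =>
            obtain ⟨p', q'⟩ := pq
            rw [hq] at h
            obtain ⟨hp1, hq1⟩ := Option.some.inj h |> Prod.mk.inj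
            subst hp1
            subst hq1
            have := ih p' q' hq
            simp only [List.length_cons]
            omega

-- B's main loop: append the slice before each occurrence, skip needle,
-- whitespace and one bracketed group, join the slices.
def pvStripB (cs : List Char) : List Char :=
  match h : pvSplitAtNeedle cs with
  | none => cs
  | some (pre, post) => pre ++ pvStripB (pvSkipGroup (post.dropWhile pvIsWs))
termination_by cs.length
decreasing_by
  have hl := pvSplitAtNeedle_length cs pre post h
  -- length decrease for the recursive call
  calc (pvSkipGroup (post.dropWhile pvIsWs)).length
      ≤ (post.dropWhile pvIsWs).length := pvSkipGroup_length_le _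
    _ ≤ post.length := List.length_dropWhile_le _ _
    _ < cs.length := by omega

def strip_twocolumn_py_alt (text : String) : String := String.ofList (pvStripB text.toList)

-- ===== PRECONDITION & SPEC =====
def Spec_strip_twocolumn_py (text : String) (out : String) : Prop := out = strip_twocolumn_py_alt text
instance (text : String) (out : String) : Decidable (Spec_strip_twocolumn_py text out) := by unfold Spec_strip_twocolumn_py; infer_instance

-- ===== CLAIM (what is proved, stated in full; the proofs are below) =====
def Claim_equal_strip_twocolumn_py : Prop := ∀ (text : String), Dom_strip_twocolumn_py text → Spec_strip_twocolumn_py text (strip_twocolumn_py text)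

-- ===== LEMMAS AND PROOFS =====

-- One unfolding of A's scan expressed through B's split: A copies exactly the
-- characters before the first needle occurrence, then skips like B.
theorem pvStripA_split : ∀ (cs : List Char),
    pvStripA cs = match pvSplitAtNeedle cs with
      | none => cs
      | some (pre, post) => pre ++ pvStripA (pvSkipGroup (post.dropWhile pvIsWs)) := by
  intro cs
  induction cs with
  | nil => simp [pvStripA, pvSplitAtNeedle]
  | cons c rest ih =>
      by_cases hp : pvNeedle.isPrefixOf (c :: rest)
      · rw [pvStripA, if_pos hp]
        simp only [pvSplitAtNeedle, if_pos hp, List.nil_append]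
      · rw [pvStripA, if_neg hp]
        simp only [pvSplitAtNeedle, if_neg hp]
        rw [ih]
        cases hq : pvSplitAtNeedle rest with
        | none => simp
        | some pq => obtain ⟨p', q'⟩ := pq; simp

theorem pvStripA_eq_B : ∀ (n : Nat) (cs : List Char), cs.length ≤ n → pvStripA cs = pvStripB cs := by
  intro n
  induction n with
  | zero =>
      intro cs hcs
      have : cs = [] := List.eq_nil_of_length_eq_zero (Nat.le_zero.mp hcs)
      subst this
      simp [pvStripA, pvStripB, pvSplitAtNeedle]
  | succ n ih =>
      intro cs hcs
      rw [pvStripA_split, pvStripB]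
      cases hq : pvSplitAtNeedle cs with
      | none => simp
      | some pq =>
          obtain ⟨pre, post⟩ := pq
          have hl := pvSplitAtNeedle_length cs pre post hq
          have hrec : (pvSkipGroup (post.dropWhile pvIsWs)).length ≤ n := by
            have h1 := pvSkipGroup_length_le (post.dropWhile pvIsWs)
            have h2 := List.length_dropWhile_le pvIsWs post
            omega
          simp only []
          rw [ih _ hrec]

-- ===== VERDICT (by name: the statement is the Claim_ definition above) =====
theorem strip_twocolumn_py_spec : Claim_equal_strip_twocolumn_py := by
  intro text _
  unfold Spec_strip_twocolumn_py strip_twocolumn_py strip_twocolumn_py_alt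
  rw [pvStripA_eq_B text.toList.length text.toList (le_refl _)]
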